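-- pv_equiv track=rewrite | github.com/MrBrantCode/unitest_baseline | mut_generate/mist_train_cf/cf_70323/solution.py | max_vowel_words
-- ===== SOURCE A (Python) =====
-- def max_vowel_words(word_list):
--     vowels = ['a', 'e', 'i', 'o', 'u', 'y']
--     max_vowel_count = 0
--     max_vowel_words = []
--
--     for word in word_list:
--         vowel_count = sum(letter in vowels for letter in word)
--         if vowel_count > max_vowel_count:
--             max_vowel_count = vowel_count
--             max_vowel_words = [word]
--         elif vowel_count == max_vowel_count:
--             max_vowel_words.append(word)
--
--     return max_vowel_words
-- ===== SOURCE B (Python) =====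
-- def max_vowel_words(word_list):
--     vowels = ['a', 'e', 'i', 'o', 'u', 'y']
--     words = list(word_list)
--     counts = [sum(c in vowels for c in w) for w in words]
--     max_count = max(counts, default=0)
--     return [w for w, c in zip(words, counts) if c == max_count]
-- ===== Notes on version B (the rewrite author's own statement) =====
-- stated objective: simpler
-- what changed: Replaces the online running-max with reset/append control flow by a two-pass table-then-filter: precompute vowel counts, take their max (default 0), then filter words with that count.
import Mathlib
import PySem

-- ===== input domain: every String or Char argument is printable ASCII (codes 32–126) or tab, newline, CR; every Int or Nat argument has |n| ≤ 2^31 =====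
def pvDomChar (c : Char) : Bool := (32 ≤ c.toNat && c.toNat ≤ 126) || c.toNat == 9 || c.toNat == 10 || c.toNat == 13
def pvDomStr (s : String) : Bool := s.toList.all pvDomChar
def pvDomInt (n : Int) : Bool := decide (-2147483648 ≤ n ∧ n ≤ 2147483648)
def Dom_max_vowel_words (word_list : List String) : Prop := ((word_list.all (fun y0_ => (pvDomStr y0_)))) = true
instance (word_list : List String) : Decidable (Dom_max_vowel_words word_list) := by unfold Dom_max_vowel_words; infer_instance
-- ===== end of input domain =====

-- B replaces A's online running-max with reset/append by a two-pass counts-table → max → filter; simpler, same cost.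


-- ===== PORT A =====
-- sum(letter in vowels for letter in word); shared by both sources verbatim
def pvVowelCount (w : String) : Nat :=
  w.toList.foldl (fun a c => a + (if c ∈ ['a','e','i','o','u','y'] then 1 else 0)) 0

-- A's loop: running max_vowel_count / accumulator with reset-or-append
def pvALoop : List String → Nat → List String → List String
  | [], _, acc => acc
  | w :: ws, m, acc =>
    let c := pvVowelCount w
    if c > m then pvALoop ws c [w]
    else if c = m then pvALoop ws m (acc ++ [w])
    else pvALoop ws m acc

def max_vowel_words (word_list : List String) : List String :=
  pvALoop word_list 0 []

-- ===== PORT B =====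
def max_vowel_words_alt (word_list : List String) : List String :=
  let counts := word_list.map pvVowelCount
  let maxCount := counts.foldl max 0
  ((word_list.zip counts).filter (fun p => p.2 == maxCount)).map Prod.fst

-- ===== PRECONDITION & SPEC =====
def Spec_max_vowel_words (word_list : List String) (out : List String) : Prop := out = max_vowel_words_alt word_list
instance (word_list : List String) (out : List String) : Decidable (Spec_max_vowel_words word_list out) := by unfold Spec_max_vowel_words; infer_instance

-- ===== CLAIM (what is proved, stated in full; the proofs are below) =====
def Claim_equal_max_vowel_words : Prop := ∀ (word_list : List String), Dom_max_vowel_words word_list → Spec_max_vowel_words word_list (max_vowel_words word_list)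

-- ===== LEMMAS AND PROOFS =====

-- the filter over the zip with the counts table is a filter on the words
lemma pv_zip_filter (ws : List String) (m : Nat) :
    ((ws.zip (ws.map pvVowelCount)).filter (fun p => p.2 == m)).map Prod.fst
      = ws.filter (fun w => pvVowelCount w == m) := by
  induction ws with
  | nil => rfl
  | cons w ws ih =>
    simp only [List.map_cons, List.zip_cons_cons, List.filter_cons]
    by_cases h : pvVowelCount w == m <;> simp [h, ih]

-- k is a lower bound of a running max started at k
lemma pv_le_foldl_max : ∀ (l : List Nat) (k : Nat), k ≤ l.foldl max k := by
  intro l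
  induction l with
  | nil => intro k; simp
  | cons a l ih =>
    intro k
    simpa using le_trans (le_max_left k a) (ih (max k a))

-- invariant of A's loop: result is (acc if the max does not rise) ++ filter at the final max
lemma pv_aloop (ws : List String) : ∀ (m : Nat) (acc : List String),
    pvALoop ws m acc
      = (if (ws.map pvVowelCount).foldl max m = m then acc else [])
          ++ ws.filter (fun w => pvVowelCount w == (ws.map pvVowelCount).foldl max m) := by
  induction ws with
  | nil => intro m acc; simp [pvALoop]
  | cons w ws ih =>
    intro m acc
    simp only [pvALoop, List.map_cons, List.foldl_cons, List.filter_cons]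
    by_cases h1 : pvVowelCount w > m
    · rw [if_pos h1, ih (pvVowelCount w) [w]]
      have hmc : max m (pvVowelCount w) = pvVowelCount w := by omega
      simp only [hmc]
      have hMc : pvVowelCount w ≤ (ws.map pvVowelCount).foldl max (pvVowelCount w) :=
        pv_le_foldl_max _ _
      by_cases h2 : (ws.map pvVowelCount).foldl max (pvVowelCount w) = pvVowelCount w
      · simp [h2, show ¬ pvVowelCount w = m by omega]
      · have hne : ¬ (ws.map pvVowelCount).foldl max (pvVowelCount w) = m := by omega
        have heq : ¬ (pvVowelCount w == (ws.map pvVowelCount).foldl max (pvVowelCount w)) = true := by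
          simp; omega
        simp [h2, hne, heq]
    · by_cases h2 : pvVowelCount w = m
      · rw [if_neg h1, if_pos h2, ih m (acc ++ [w])]
        have hmc : max m (pvVowelCount w) = m := by omega
        simp only [hmc]
        by_cases h3 : (ws.map pvVowelCount).foldl max m = m
        · have heq : (pvVowelCount w == (ws.map pvVowelCount).foldl max m) = true := by
            simp [h3, h2]
          simp [h3, h2]
        · have hMm : m ≤ (ws.map pvVowelCount).foldl max m := pv_le_foldl_max _ _
          have heq : ¬ (pvVowelCount w == (ws.map pvVowelCount).foldl max m) = true := by
            simp; omega
          simp [h3, heq]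
      · rw [if_neg h1, if_neg h2, ih m acc]
        have hmc : max m (pvVowelCount w) = m := by omega
        simp only [hmc]
        have hMm : m ≤ (ws.map pvVowelCount).foldl max m := pv_le_foldl_max _ _
        have heq : ¬ (pvVowelCount w == (ws.map pvVowelCount).foldl max m) = true := by
          simp; omega
        simp [heq]

-- ===== VERDICT (by name: the statement is the Claim_ definition above) =====
theorem max_vowel_words_spec : Claim_equal_max_vowel_words := by
  intro ws _
  unfold Spec_max_vowel_words max_vowel_words max_vowel_words_alt
  rw [pv_aloop ws 0 [], pv_zip_filter]
  split <;> simp
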